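-- pv_equiv track=rewrite | github.com/asifsadmain/Karel | prog_policies/gpt/utils.py | replace_keywords
-- ===== SOURCE A (Python) =====
-- def replace_keywords(program):
--     keywords = ["IF", "WHILE", "IFELSE", "ELSE", "REPEAT", "DEF"]
--     program_list = program.split()
--     keyword_list = [word for word in program_list if word in keywords]
--     for i in range(len(keyword_list) - 1):
--         if keyword_list[i] == "IF" and keyword_list[i + 1] == "ELSE":
--             keyword_list[i] = "IFELSE"
--     new_program = []
--     keyword_index = 0
--     for word in program_list:
--         if word in keywords:
--             new_program.append(keyword_list[keyword_index])
--             keyword_index += 1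
--         else:
--             new_program.append(word)
--     return ' '.join(new_program)
-- ===== SOURCE B (Python) =====
-- def replace_keywords(program):
--     keywords = {"IF", "WHILE", "IFELSE", "ELSE", "REPEAT", "DEF"}
--     new_program = []
--     prev_kw = None
--     prev_idx = -1
--     for word in program.split():
--         if word in keywords:
--             if word == "ELSE" and prev_kw == "IF":
--                 new_program[prev_idx] = "IFELSE"
--             new_program.append(word)
--             prev_kw = word
--             prev_idx = len(new_program) - 1
--         else:
--             new_program.append(word)
--     return ' '.join(new_program)
-- ===== Notes on version B (the rewrite author's own statement) =====
-- stated objective: simpler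
-- what changed: Replaces A's three passes (filter keywords, pairwise-rewrite the keyword list with an index loop, re-merge by keyword counter) with a single streaming pass that back-patches the most recent keyword's output slot when an ELSE keyword follows an IF keyword.
import Mathlib
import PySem

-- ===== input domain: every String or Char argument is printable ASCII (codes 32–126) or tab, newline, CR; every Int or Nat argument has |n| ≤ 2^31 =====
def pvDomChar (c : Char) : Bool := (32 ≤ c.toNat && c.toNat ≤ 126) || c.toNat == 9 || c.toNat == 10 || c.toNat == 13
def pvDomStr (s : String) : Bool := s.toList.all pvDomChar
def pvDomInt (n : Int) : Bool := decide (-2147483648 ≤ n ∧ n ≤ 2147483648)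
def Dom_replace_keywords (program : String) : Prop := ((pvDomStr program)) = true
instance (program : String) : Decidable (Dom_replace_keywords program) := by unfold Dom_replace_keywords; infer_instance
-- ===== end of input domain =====

-- B is a single streaming pass that back-patches the previous keyword's slot, replacing A's
-- three-pass filter/rewrite/re-merge structure: objective 'simpler', same value everywhere.

-- ===== PORT A =====
def pvKeywordsA : List String := ["IF", "WHILE", "IFELSE", "ELSE", "REPEAT", "DEF"]

-- body of A's 'for i in range(len(keyword_list) - 1)' loop
def pvStepA1 (kl : List String) (i : Int) : List String :=
  if PySem.List.pyGetD kl i "" == "IF" && PySem.List.pyGetD kl (i + 1) "" == "ELSE" then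
    PySem.List.pySetD kl i "IFELSE"
  else kl

-- body of A's rebuild loop; the fixed rewritten keyword list is a parameter
def pvStepA2 (kl : List String) (st : List String × Int) (word : String) : List String × Int :=
  if pvKeywordsA.contains word then
    (st.1 ++ [PySem.List.pyGetD kl st.2 ""], st.2 + 1)
  else (st.1 ++ [word], st.2)

def replace_keywords (program : String) : String :=
  let program_list := PySem.Str.split₀ program
  let keyword_list := program_list.filter (fun word => pvKeywordsA.contains word)
  let keyword_list :=
    (PySem.List.pyRange 0 ((keyword_list.length : Int) - 1) 1).foldl pvStepA1 keyword_list
  let st := program_list.foldl (pvStepA2 keyword_list) ([], 0)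
  PySem.Str.join " " st.1

-- ===== PORT B =====
def pvKeywordsB : PySem.Set String := PySem.Set.ofList ["IF", "WHILE", "IFELSE", "ELSE", "REPEAT", "DEF"]

-- body of B's single streaming loop: state = (new_program, prev_kw, prev_idx)
def pvStepB (st : List String × Option String × Int) (word : String) :
    List String × Option String × Int :=
  let (np, prev_kw, prev_idx) := st
  if PySem.Set.contains pvKeywordsB word then
    let np := if word == "ELSE" && prev_kw == some "IF" then
        PySem.List.pySetD np prev_idx "IFELSE" else np
    let np := np ++ [word]
    (np, some word, (np.length : Int) - 1)
  else (np ++ [word], prev_kw, prev_idx)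

def replace_keywords_alt (program : String) : String :=
  let st := (PySem.Str.split₀ program).foldl pvStepB ([], none, -1)
  PySem.Str.join " " st.1

-- ===== PRECONDITION & SPEC =====
def Spec_replace_keywords (program : String) (out : String) : Prop := out = replace_keywords_alt program
instance (program : String) (out : String) : Decidable (Spec_replace_keywords program out) := by unfold Spec_replace_keywords; infer_instance

-- ===== CLAIM (what is proved, stated in full; the proofs are below) =====
def Claim_equal_replace_keywords : Prop := ∀ (program : String), Dom_replace_keywords program → Spec_replace_keywords program (replace_keywords program)

-- ===== LEMMAS AND PROOFS =====

-- A's pairwise rewrite of the keyword list, as a structural recursion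
def pvTrans : List String → List String
  | [] => []
  | [x] => [x]
  | x :: y :: r => (if x == "IF" && y == "ELSE" then "IFELSE" else x) :: pvTrans (y :: r)

-- A's re-merge pass, as a structural recursion consuming the rewritten keyword list as a queue
def pvMerge : List String → List String → List String
  | [], _ => []
  | w :: ws, kl =>
      if pvKeywordsA.contains w then kl.headD "" :: pvMerge ws kl.tail
      else w :: pvMerge ws kl

-- first keyword token of a suffix
def pvNextKw (ws : List String) : Option String :=
  (ws.filter fun t => pvKeywordsA.contains t).head?

-- common lookahead spec: IF becomes IFELSE iff the next keyword after it is ELSE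
def pvS : List String → List String
  | [] => []
  | w :: ws =>
      (if w == "IF" && (pvNextKw ws == some "ELSE") then "IFELSE" else w) :: pvS ws

lemma pv_ne_if {w : String} (h : pvKeywordsA.contains w = false) : w ≠ "IF" := by
  intro hc; subst hc; simp [pvKeywordsA] at h

lemma pvTrans_cons (x : String) (l : List String) :
    pvTrans (x :: l) =
      (if x == "IF" && (l.head? == some "ELSE") then "IFELSE" else x) :: pvTrans l := by
  cases l <;> simp [pvTrans]

lemma pv_getD_append {α : Type} (d x : α) (r : List α) (pre : List α) :
    (pre ++ x :: r).getD pre.length d = x := by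
  induction pre with
  | nil => simp [List.getD]
  | cons a t ih => simpa [List.getD] using ih

lemma pv_getD_drop {α : Type} (kl : List α) : ∀ (k : Nat) (d : α),
    kl.getD k d = (kl.drop k).headD d := by
  induction kl with
  | nil => intro k d; simp [List.getD]
  | cons a t ih => intro k d; cases k <;> simp [List.getD, ih]

lemma pv_set_append_length {α : Type} (l : List α) (w v : α) (r : List α) :
    (l ++ w :: r).set l.length v = l ++ v :: r := by
  induction l with
  | nil => simp
  | cons a t ih => simp [List.set, ih]

-- L1: A's range loop computes pvTrans, with an already-processed prefix
lemma pvLoopA (rest : List String) : ∀ (pre : List String),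
    (PySem.List.pyRange (pre.length) ((pre.length : Int) + rest.length - 1) 1).foldl
        pvStepA1 (pre ++ rest) = pre ++ pvTrans rest := by
  induction rest with
  | nil =>
    intro pre
    rw [PySem.List.pyRange_one_eq_nil (by simp only [List.length_nil]; push_cast; omega)]
    simp [pvTrans]
  | cons x r ih =>
    intro pre
    cases r with
    | nil =>
      rw [PySem.List.pyRange_one_eq_nil (by simp only [List.length_cons, List.length_nil]; push_cast; omega)]
      simp [pvTrans]
    | cons y rr =>
      rw [PySem.List.pyRange_one_cons (by simp; omega)]
      simp only [List.foldl_cons]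
      have hget1 : PySem.List.pyGetD (pre ++ x :: y :: rr) (pre.length : Int) "" = x := by
        rw [PySem.List.pyGetD_natCast]
        exact pv_getD_append "" x (y :: rr) pre
      have hget2 : PySem.List.pyGetD (pre ++ x :: y :: rr) ((pre.length : Int) + 1) "" = y := by
        have hc : ((pre.length : Int) + 1) = (((pre ++ [x]).length : Nat) : Int) := by
          push_cast; simp
        rw [hc, PySem.List.pyGetD_natCast]
        have : pre ++ x :: y :: rr = (pre ++ [x]) ++ y :: rr := by simp
        rw [this]
        exact pv_getD_append "" y rr (pre ++ [x])
      have hstep : pvStepA1 (pre ++ x :: y :: rr) (pre.length : Int) =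
          pre ++ (if x == "IF" && y == "ELSE" then "IFELSE" else x) :: y :: rr := by
        unfold pvStepA1
        rw [hget1, hget2]
        by_cases hc : (x == "IF" && y == "ELSE") = true
        · simp only [hc, if_true]
          rw [PySem.List.pySetD_natCast]
          exact pv_set_append_length pre x "IFELSE" (y :: rr)
        · simp only [hc]; simp [hc]
      rw [hstep]
      have hre : pre ++ (if x == "IF" && y == "ELSE" then "IFELSE" else x) :: y :: rr =
          (pre ++ [if x == "IF" && y == "ELSE" then "IFELSE" else x]) ++ y :: rr := by simp
      have hrange : PySem.List.pyRange ((pre.length : Int) + 1)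
            ((pre.length : Int) + (x :: y :: rr).length - 1) 1 =
          PySem.List.pyRange (((pre ++ [if x == "IF" && y == "ELSE" then "IFELSE" else x]).length : Int))
            (((pre ++ [if x == "IF" && y == "ELSE" then "IFELSE" else x]).length : Int) + (y :: rr).length - 1) 1 := by
        simp; congr 1 <;> push_cast <;> ring
      rw [hre, hrange, ih]
      simp [pvTrans]

lemma pvMerge_cons_kw {w : String} (hw : pvKeywordsA.contains w = true)
    (ws kl : List String) :
    pvMerge (w :: ws) kl = kl.headD "" :: pvMerge ws kl.tail := by
  have h : pvMerge (w :: ws) kl =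
      if pvKeywordsA.contains w then kl.headD "" :: pvMerge ws kl.tail
      else w :: pvMerge ws kl := rfl
  rw [h, hw]
  simp

lemma pvMerge_cons_nonkw {w : String} (hw : pvKeywordsA.contains w = false)
    (ws kl : List String) :
    pvMerge (w :: ws) kl = w :: pvMerge ws kl := by
  have h : pvMerge (w :: ws) kl =
      if pvKeywordsA.contains w then kl.headD "" :: pvMerge ws kl.tail
      else w :: pvMerge ws kl := rfl
  rw [h, hw]
  simp

-- L2: A's rebuild loop computes pvMerge on the not-yet-consumed part of the keyword list
lemma pvRebuild (toks : List String) : ∀ (kl np0 : List String) (k : Nat),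
    (toks.foldl (pvStepA2 kl) (np0, (k : Int))).1 = np0 ++ pvMerge toks (kl.drop k) := by
  induction toks with
  | nil => intro kl np0 k; simp [pvMerge]
  | cons w ws ih =>
    intro kl np0 k
    by_cases hw : pvKeywordsA.contains w = true
    · have hget : PySem.List.pyGetD kl (k : Int) "" = (kl.drop k).headD "" := by
        rw [PySem.List.pyGetD_natCast]
        exact pv_getD_drop kl k ""
      have hcast : (k : Int) + 1 = ((k + 1 : Nat) : Int) := by push_cast; ring
      have hstep : pvStepA2 kl (np0, (k : Int)) w =
          (np0 ++ [(kl.drop k).headD ""], ((k + 1 : Nat) : Int)) := by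
        unfold pvStepA2
        rw [hw, hget, hcast]; simp
      rw [List.foldl_cons, hstep, ih, pvMerge_cons_kw hw, List.tail_drop]
      simp
    · have hw' : pvKeywordsA.contains w = false := by simpa using hw
      have hstep : pvStepA2 kl (np0, (k : Int)) w = (np0 ++ [w], (k : Int)) := by
        unfold pvStepA2
        rw [hw']; simp
      rw [List.foldl_cons, hstep, ih, pvMerge_cons_nonkw hw']
      simp

-- L3: merging pvTrans of the keyword subsequence is the lookahead spec
lemma pvMergeTrans (toks : List String) :
    pvMerge toks (pvTrans (toks.filter fun w => pvKeywordsA.contains w)) = pvS toks := by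
  induction toks with
  | nil => simp [pvMerge, pvS, pvTrans]
  | cons w ws ih =>
    by_cases hw : pvKeywordsA.contains w = true
    · rw [List.filter_cons, if_pos hw, pvTrans_cons, pvMerge_cons_kw hw]
      simp only [List.tail_cons, List.headD_cons, ih]
      simp only [pvS, pvNextKw]
      rfl
    · have hw' : pvKeywordsA.contains w = false := by simpa using hw
      rw [List.filter_cons, if_neg (by rw [hw']; exact Bool.false_ne_true),
        pvMerge_cons_nonkw hw', ih]
      simp only [pvS, pvNextKw]
      rw [show (w == "IF") = false by have := pv_ne_if hw'; simp [this]]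
      simp

lemma pvNextKw_cons_kw {w : String} (ws : List String) (hw : pvKeywordsA.contains w = true) :
    pvNextKw (w :: ws) = some w := by
  have hwm : w ∈ pvKeywordsA := by simpa using hw
  simp [pvNextKw, List.filter_cons, hwm]

lemma pvNextKw_cons_nonkw {w : String} (ws : List String) (hw : pvKeywordsA.contains w = false) :
    pvNextKw (w :: ws) = pvNextKw ws := by
  have hwm : w ∉ pvKeywordsA := by simpa using hw
  simp [pvNextKw, List.filter_cons, hwm]

lemma pvS_cons (w : String) (ws : List String) :
    pvS (w :: ws) =
      (if w == "IF" && (pvNextKw ws == some "ELSE") then "IFELSE" else w) :: pvS ws := by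
  simp only [pvS]

lemma pvMemB {w : String} (hw : pvKeywordsA.contains w = true) : w ∈ pvKeywordsB := by
  have h : pvKeywordsB = pvKeywordsA := by decide
  rw [h]; simpa using hw

lemma pvNotMemB {w : String} (hw : pvKeywordsA.contains w = false) : w ∉ pvKeywordsB := by
  have h : pvKeywordsB = pvKeywordsA := by decide
  rw [h]; simpa using hw

-- L4: B's streaming loop equals (possible back-patch into the prefix) ++ lookahead spec
lemma pvLoopB (ws : List String) : ∀ (np : List String) (pk : Option String) (pi : Int),
    (pk = some "IF" → 0 ≤ pi ∧ pi < (np.length : Int)) →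
    (ws.foldl pvStepB (np, pk, pi)).1 =
      (if pk == some "IF" && (pvNextKw ws == some "ELSE") then
        PySem.List.pySetD np pi "IFELSE" else np) ++ pvS ws := by
  induction ws with
  | nil =>
    intro np pk pi _
    simp [pvNextKw, pvS]
  | cons w ws ih =>
    intro np pk pi hinv
    by_cases hw : pvKeywordsA.contains w = true
    · by_cases hfire : (w == "ELSE" && pk == some "IF") = true
      · -- patch fires now
        have hwE : w = "ELSE" := by
          simp only [Bool.and_eq_true, beq_iff_eq] at hfire; exact hfire.1
        have hpk : pk = some "IF" := by
          simp only [Bool.and_eq_true, beq_iff_eq] at hfire; exact hfire.2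
        have hstep : pvStepB (np, pk, pi) w =
            (PySem.List.pySetD np pi "IFELSE" ++ [w], some w,
              ((PySem.List.pySetD np pi "IFELSE" ++ [w]).length : Int) - 1) := by
          simp [pvStepB, pvMemB hw, hfire]
        rw [List.foldl_cons, hstep,
          ih _ _ _ (by intro h; rw [hwE] at h; simp at h)]
        have hc1 : (some w == some "IF" && (pvNextKw ws == some "ELSE")) = false := by
          rw [hwE]; simp
        rw [hc1]
        have hcond : (pk == some "IF" && (pvNextKw (w :: ws) == some "ELSE")) = true := by
          rw [hpk, pvNextKw_cons_kw ws hw, hwE]; decide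
        rw [hcond, pvS_cons]
        rw [show (w == "IF" && (pvNextKw ws == some "ELSE")) = false by rw [hwE]; simp]
        simp
      · -- keyword, no patch now
        have hfire' : (w == "ELSE" && pk == some "IF") = false := by simpa using hfire
        have hstep : pvStepB (np, pk, pi) w =
            (np ++ [w], some w, ((np ++ [w]).length : Int) - 1) := by
          simp [pvStepB, pvMemB hw, hfire']
        have hlen : ((np ++ [w]).length : Int) - 1 = ((np.length : Nat) : Int) := by
          simp
        rw [List.foldl_cons, hstep, hlen,
          ih _ _ _ (by intro _; constructor; omega; simp)]
        have hset : PySem.List.pySetD (np ++ [w]) ((np.length : Nat) : Int) "IFELSE" =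
            np ++ ["IFELSE"] := by
          rw [PySem.List.pySetD_natCast]
          exact pv_set_append_length np w "IFELSE" []
        have hcondR : (pk == some "IF" && (pvNextKw (w :: ws) == some "ELSE")) = false := by
          rw [pvNextKw_cons_kw ws hw]
          cases hpk : (pk == some "IF") with
          | false => simp
          | true =>
            have hwe : (w == "ELSE") = false := by
              by_contra hc
              have h1 : (w == "ELSE") = true := by
                cases h : (w == "ELSE") with
                | false => exact absurd h hc
                | true => rfl
              rw [h1, hpk] at hfire'
              simp at hfire'
            simp only [Bool.true_and, Option.some.injEq, beq_iff_eq]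
            simpa using hwe
        rw [hcondR, pvS_cons]
        by_cases hc : (w == "IF" && (pvNextKw ws == some "ELSE")) = true
        · have h1 : (some w == some "IF" && (pvNextKw ws == some "ELSE")) = true := by
            simp only [Bool.and_eq_true, beq_iff_eq] at hc ⊢
            exact ⟨by rw [hc.1], hc.2⟩
          rw [h1, hc]
          simp [hset]
        · have hc' : (w == "IF" && (pvNextKw ws == some "ELSE")) = false := by simpa using hc
          have h1 : (some w == some "IF" && (pvNextKw ws == some "ELSE")) = false := by
            have hsw : (some w == some "IF") = (w == "IF") := by
              cases hwi : (w == "IF") <;> simp_all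
            rw [hsw]; exact hc'
          rw [h1, hc']
          simp
    · -- not a keyword: pass through
      have hw' : pvKeywordsA.contains w = false := by simpa using hw
      have hstep : pvStepB (np, pk, pi) w = (np ++ [w], pk, pi) := by
        simp [pvStepB, pvNotMemB hw']
      rw [List.foldl_cons, hstep,
        ih _ _ _ (by intro h; rcases hinv h with ⟨h1, h2⟩; constructor; exact h1; simp; omega)]
      rw [pvNextKw_cons_nonkw ws hw', pvS_cons]
      rw [show (w == "IF") = false by have := pv_ne_if hw'; simp [this]]
      simp only [Bool.false_and, Bool.false_eq_true, if_false]
      by_cases hc : (pk == some "IF" && (pvNextKw ws == some "ELSE")) = true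
      · have hpk : pk = some "IF" := by
          simp only [Bool.and_eq_true, beq_iff_eq] at hc; exact hc.1
        rcases hinv hpk with ⟨h1, h2⟩
        have hset : PySem.List.pySetD (np ++ [w]) pi "IFELSE" =
            PySem.List.pySetD np pi "IFELSE" ++ [w] := by
          rw [PySem.List.pySetD_of_nonneg (np ++ [w]) "IFELSE" h1,
            PySem.List.pySetD_of_nonneg np "IFELSE" h1, List.set_append]
          rw [if_pos (by omega : pi.toNat < np.length)]
        rw [hc, hset]
        simp
      · have hc' : (pk == some "IF" && (pvNextKw ws == some "ELSE")) = false := by simpa using hc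
        rw [hc']
        simp

lemma pvA_eq_S (program : String) :
    replace_keywords program = PySem.Str.join " " (pvS (PySem.Str.split₀ program)) := by
  unfold replace_keywords
  set toks := PySem.Str.split₀ program with htoks
  set fl := toks.filter (fun word => pvKeywordsA.contains word) with hfl
  have h1 : (PySem.List.pyRange 0 ((fl.length : Int) - 1) 1).foldl pvStepA1 fl = pvTrans fl := by
    have := pvLoopA fl []
    simpa using this
  simp only []
  rw [h1]
  have h2 := pvRebuild toks (pvTrans fl) [] 0
  simp only [Nat.cast_zero, List.drop_zero, List.nil_append] at h2
  rw [h2, hfl, pvMergeTrans]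

lemma pvB_eq_S (program : String) :
    replace_keywords_alt program = PySem.Str.join " " (pvS (PySem.Str.split₀ program)) := by
  unfold replace_keywords_alt
  have h := pvLoopB (PySem.Str.split₀ program) [] none (-1) (by intro h; simp at h)
  simp only [] 
  rw [h]
  simp

-- ===== VERDICT (by name: the statement is the Claim_ definition above) =====
theorem replace_keywords_spec : Claim_equal_replace_keywords := by
  intro program _
  unfold Spec_replace_keywords
  rw [pvA_eq_S, pvB_eq_S]
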